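-- pv_equiv track=rewrite | github.com/raghurammullapudi44/Mission-R-D | PythonCourse/finaltest_problem4.py | transform
-- ===== SOURCE A (Python) =====
-- def transform(sentence):
--     pass
--     input=sentence
--     try:
--         words_list=[]
--         space_index=0
--         space_index=input.index(' ')
--         words_list.append(input[0:input.index(' ')])
--
--         while space_index in range(len(input)):
--             if input.index(' ',space_index+1):
--                 words_list.append(input[space_index+1:input.index(' ',space_index+1)])
--                 space_index=input.index(' ',space_index+1)
--     except ValueError:
--         if space_index == 0:
--             words_list.append(input[space_index:len(input)+1])
--         else:
--             words_list.append(input[space_index+1:len(input)+1])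
--     x=[]
--     for i in words_list:
--         z=convert(rem_dup(rem_dig(i)))
--         if z!=[]:
--             x.append(z)
--     y=''
--     for i in x:
--         y=y+''.join(i)+' '
--     return y[:-1]
--
-- def convert(a):
--     x=[]
--     y=[]
--     for i in a:
--         if i.lower() in 'aeiou':
--             x.append(i)
--         else:
--             y.append(i)
--     x=x+y
--     return x
--
-- def rem_dig(a):
--     x=[]
--     for i in a:
--         if ((ord(i) >= 65 and ord(i)<=90)  or (ord(i) >= 97 and ord(i)<= 122)) and ord(i)!=32:
--             x.append(i)
--     return x
--
-- def rem_dup(nums):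
--     i = 1
--     while i < len(nums):
--         if nums[i].lower() == nums[i-1].lower():
--             nums.pop(i)
--             i -= 1
--         i += 1
--     return nums
-- ===== SOURCE B (Python) =====
-- def transform(sentence):
--     out = []
--     for word in sentence.split(' '):
--         letters = [c for c in word if c.isalpha()]
--         dedup = []
--         prev = None
--         for c in letters:
--             cl = c.lower()
--             if cl != prev:
--                 dedup.append(c)
--                 prev = cl
--         if dedup:
--             vowels = [c for c in dedup if c.lower() in 'aeiou']
--             others = [c for c in dedup if c.lower() not in 'aeiou']
--             out.append(''.join(vowels + others))
--     return ' '.join(out)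
-- ===== Notes on version B (the rewrite author's own statement) =====
-- stated objective: faster
-- what changed: replaces the manual index()-based splitting, the quadratic pop()-based adjacent-duplicate removal and the trailing-space trim by a single-space str.split, one linear pass per word keeping the previous lowered letter, and a str.join at the end
import Mathlib
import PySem

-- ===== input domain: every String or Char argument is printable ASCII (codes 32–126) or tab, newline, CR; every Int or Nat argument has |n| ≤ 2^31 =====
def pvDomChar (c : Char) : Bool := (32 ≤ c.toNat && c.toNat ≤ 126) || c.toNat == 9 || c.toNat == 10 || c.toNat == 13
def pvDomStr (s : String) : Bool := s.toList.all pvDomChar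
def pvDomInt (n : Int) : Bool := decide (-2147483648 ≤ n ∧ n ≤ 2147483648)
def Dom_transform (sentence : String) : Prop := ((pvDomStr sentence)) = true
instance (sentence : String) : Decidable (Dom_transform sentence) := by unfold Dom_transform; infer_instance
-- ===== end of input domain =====

-- B replaces A's index()-based splitting, quadratic pop()-based dedup and trailing-space trim by a
-- single-space str.split, one linear pass per word, and a final str.join (measured faster).

-- ===== PORT A =====

-- rem_dig: keep chars with (65 ≤ ord ≤ 90 or 97 ≤ ord ≤ 122) and ord ≠ 32  (ord c = c.toNat, exact)
def remDig (a : List Char) : List Char :=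
  a.foldl (fun x i =>
    if ((65 ≤ i.toNat ∧ i.toNat ≤ 90) ∨ (97 ≤ i.toNat ∧ i.toNat ≤ 122)) ∧ i.toNat ≠ 32
    then x ++ [i] else x) []

-- rem_dup's while loop; invariant: called with i ≥ 1 only, so Python's nums[i-1] never takes the
-- negative-index path (getD is exact here since 0 ≤ i-1 < i < len); nums.pop(i) with 0 ≤ i < len
-- removes index i (its returned element is unused) = eraseIdx, exact here.
def remDupLoop (nums : List Char) (i : Nat) : List Char :=
  if h : i < nums.length then
    if PySem.Chars.lowerChar (nums.getD i ' ') = PySem.Chars.lowerChar (nums.getD (i - 1) ' ') then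
      remDupLoop (nums.eraseIdx i) (i - 1 + 1)
    else
      remDupLoop nums (i + 1)
  else nums
termination_by nums.length * 2 - i
decreasing_by
  · simp [List.length_eraseIdx, h]; omega
  · omega

def remDup (nums : List Char) : List Char := remDupLoop nums 1

-- convert: vowels then non-vowels ('i.lower() in "aeiou"' on a 1-char string = substring test, exact)
def convert (a : List Char) : List Char :=
  let st := a.foldl (fun (st : List Char × List Char) i =>
    if PySem.Chars.isIn (PySem.Chars.lower [i]) ['a', 'e', 'i', 'o', 'u']
    then (st.1 ++ [i], st.2) else (st.1, st.2 ++ [i])) ([], [])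
  st.1 ++ st.2

-- the while loop of A's try block; spaceIndex is always the index of a space (so < len; the
-- 'space_index in range(len(input))' guard is kept literally as the dite condition); a ValueError
-- from input.index(' ', space_index+1) (findFrom = -1) jumps to the except branch, which appends
-- input[0:len+1] when space_index == 0 and input[space_index+1:len+1] otherwise.
def transformLoop (input : List Char) (spaceIndex : Nat) (acc : List (List Char)) :
    List (List Char) :=
  if _h : spaceIndex < input.length then
    let j := PySem.Chars.findFrom input [' '] ((spaceIndex + 1 : Nat) : Int)
    if _hj : j = -1 then
      if spaceIndex = 0 then
        acc ++ [PySem.List.slice input (some 0) (some ((input.length + 1 : Nat) : Int))]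
      else
        acc ++ [PySem.List.slice input (some ((spaceIndex + 1 : Nat) : Int))
                  (some ((input.length + 1 : Nat) : Int))]
    else
      transformLoop input j.toNat
        (acc ++ [PySem.List.slice input (some ((spaceIndex + 1 : Nat) : Int)) (some j)])
  else acc
termination_by input.length - spaceIndex
decreasing_by
  have hs := (PySem.Chars.findFrom_natCast_spec input [' '] (spaceIndex + 1) (by omega) _hj).1
  omega

def transform (sentence : String) : String :=
  let input := sentence.toList
  let wordsList :=
    -- try: space_index = input.index(' '); ValueError here → except with space_index = 0,
    -- appending input[0:len+1]
    let f0 := PySem.Chars.find input [' ']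
    if f0 = -1 then
      [PySem.List.slice input (some 0) (some ((input.length + 1 : Nat) : Int))]
    else
      transformLoop input f0.toNat [PySem.List.slice input (some 0) (some f0)]
  let x := wordsList.foldl (fun x i =>
    let z := convert (remDup (remDig i))
    if z ≠ [] then x ++ [z] else x) []
  let y := x.foldl (fun y i => y ++ i ++ [' ']) []
  String.ofList (PySem.List.slice y none (some (-1)))   -- y[:-1]

-- ===== PORT B =====

-- str.isalpha per char = PySem.Chars.isalpha (exact on the ASCII domain)
def transform_alt (sentence : String) : String :=
  let out := (PySem.Chars.splitOn sentence.toList [' ']).foldl (fun out word =>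
    let letters := word.filter PySem.Chars.isalpha
    let dedup := (letters.foldl (fun (st : List Char × Option Char) c =>
      let cl := PySem.Chars.lowerChar c
      if st.2 ≠ some cl then (st.1 ++ [c], some cl) else st) ([], none)).1
    if dedup ≠ [] then
      let vowels := dedup.filter (fun c =>
        PySem.Chars.isIn (PySem.Chars.lower [c]) ['a', 'e', 'i', 'o', 'u'])
      let others := dedup.filter (fun c =>
        !(PySem.Chars.isIn (PySem.Chars.lower [c]) ['a', 'e', 'i', 'o', 'u']))
      out ++ [vowels ++ others]
    else out) []
  String.ofList (PySem.Chars.join [' '] out)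

-- ===== PRECONDITION & SPEC =====
def Spec_transform (sentence : String) (out : String) : Prop := out = transform_alt sentence
instance (sentence : String) (out : String) : Decidable (Spec_transform sentence out) := by unfold Spec_transform; infer_instance

-- ===== CLAIM (what is proved, stated in full; the proofs are below) =====
def Claim_equal_transform : Prop := ∀ (sentence : String), Dom_transform sentence → Spec_transform sentence (transform sentence)

-- ===== LEMMAS AND PROOFS =====

-- the vowel test both programs use
def pvV (c : Char) : Bool := PySem.Chars.isIn (PySem.Chars.lower [c]) ['a', 'e', 'i', 'o', 'u']

-- letters of a word, shared spec
def fil (w : List Char) : List Char := w.filter PySem.Chars.isalpha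

-- case-insensitive adjacent dedup, shared spec
def ded (prev : Option Char) : List Char → List Char
  | [] => []
  | c :: cs =>
    if some (PySem.Chars.lowerChar c) = prev then ded prev cs
    else c :: ded (some (PySem.Chars.lowerChar c)) cs

-- what both sides compute per word, given the word's letters
def pvWordF (l : List Char) : List Char :=
  (ded none l).filter pvV ++ (ded none l).filter (fun c => !pvV c)

-- split on single spaces, shared spec
def splitSp : List Char → List (List Char)
  | [] => [[]]
  | c :: rest =>
    if c = ' ' then [] :: splitSp rest
    else match splitSp rest with
      | [] => [[c]]
      | w :: ws => (c :: w) :: ws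

-- last kept (lowered) character of the dedup pass, for the fold invariant
def dedLastAux (prev : Option Char) : List Char → Option Char
  | [] => prev
  | c :: cs =>
    if some (PySem.Chars.lowerChar c) = prev then dedLastAux prev cs
    else dedLastAux (some (PySem.Chars.lowerChar c)) cs

-- ---- generic facts ----

theorem pvAlpha (c : Char) :
    (((65 ≤ c.toNat ∧ c.toNat ≤ 90) ∨ (97 ≤ c.toNat ∧ c.toNat ≤ 122)) ∧ c.toNat ≠ 32)
    ↔ PySem.Chars.isalpha c = true := by
  have h : ∀ d : Char, (d ≤ c ↔ d.toNat ≤ c.toNat) ∧ (c ≤ d ↔ c.toNat ≤ d.toNat) :=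
    fun d => ⟨by rw [Char.le_def, UInt32.le_iff_toNat_le]; exact Iff.rfl,
              by rw [Char.le_def, UInt32.le_iff_toNat_le]; exact Iff.rfl⟩
  rw [PySem.Chars.isalpha]
  simp only [PySem.Chars.isupper, PySem.Chars.islower, Bool.or_eq_true, Bool.and_eq_true,
    decide_eq_true_eq]
  rw [(h 'A').1, (h 'Z').2, (h 'a').1, (h 'z').2]
  show _ ↔ (65 ≤ c.toNat ∧ c.toNat ≤ 90) ∨ (97 ≤ c.toNat ∧ c.toNat ≤ 122)
  omega

theorem ded_cons (prev : Option Char) (c : Char) (cs : List Char) :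
    ded prev (c :: cs) = if some (PySem.Chars.lowerChar c) = prev then ded prev cs
      else c :: ded (some (PySem.Chars.lowerChar c)) cs := by
  rw [ded]

theorem dedLastAux_cons (prev : Option Char) (c : Char) (cs : List Char) :
    dedLastAux prev (c :: cs) = if some (PySem.Chars.lowerChar c) = prev then dedLastAux prev cs
      else dedLastAux (some (PySem.Chars.lowerChar c)) cs := by
  rw [dedLastAux]

theorem singleton_prefix_iff (l : List Char) : ([' '] <+: l) ↔ l.head? = some ' ' := by
  constructor
  · rintro ⟨t, rfl⟩; rfl
  · intro h
    cases l with
    | nil => simp at h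
    | cons a t => simp at h; subst h; exact ⟨t, rfl⟩

-- ---- A-side characterisations ----

theorem remDig_aux (a : List Char) (x : List Char) :
    a.foldl (fun x i =>
      if ((65 ≤ i.toNat ∧ i.toNat ≤ 90) ∨ (97 ≤ i.toNat ∧ i.toNat ≤ 122)) ∧ i.toNat ≠ 32
      then x ++ [i] else x) x = x ++ fil a := by
  induction a generalizing x with
  | nil => simp [fil]
  | cons c cs ih =>
    simp only [List.foldl_cons]
    by_cases hc : ((65 ≤ c.toNat ∧ c.toNat ≤ 90) ∨ (97 ≤ c.toNat ∧ c.toNat ≤ 122)) ∧ c.toNat ≠ 32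
    · rw [if_pos hc, ih]
      simp only [fil]
      rw [List.filter_cons_of_pos ((pvAlpha c).mp hc)]
      simp
    · rw [if_neg hc, ih]
      simp only [fil]
      rw [List.filter_cons_of_neg (fun hb => hc ((pvAlpha c).mpr hb))]

theorem remDig_eq (a : List Char) : remDig a = fil a := by
  rw [remDig, remDig_aux]; rfl

theorem remDupLoop_spec (S : List Char) : ∀ (P : List Char) (hP : P ≠ []),
    remDupLoop (P ++ S) P.length = P ++ ded (some (PySem.Chars.lowerChar (P.getLast hP))) S := by
  induction S with
  | nil =>
    intro P hP
    rw [remDupLoop, dif_neg (by simp)]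
    simp [ded]
  | cons c cs ih =>
    intro P hP
    rcases List.eq_nil_or_concat P with rfl | ⟨Q, p, hPe⟩
    · exact absurd rfl hP
    have hg1 : (P ++ c :: cs).getD P.length ' ' = c := by
      subst hPe; simp [List.getD, List.concat_eq_append]
    have hg2 : (P ++ c :: cs).getD (P.length - 1) ' ' = p := by
      subst hPe; simp [List.getD, List.concat_eq_append]
    have hlast : P.getLast hP = p := by
      subst hPe; simp
    have hpos : 0 < P.length := List.length_pos_of_ne_nil hP
    rw [remDupLoop, dif_pos (by simp), hg1, hg2, hlast]
    by_cases he : PySem.Chars.lowerChar c = PySem.Chars.lowerChar p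
    · rw [if_pos he]
      have her : (P ++ c :: cs).eraseIdx P.length = P ++ cs := by
        rw [List.eraseIdx_append_of_length_le (le_refl _)]
        simp
      have hi : P.length - 1 + 1 = P.length := by omega
      rw [her, hi, ih P hP, hlast, ded_cons, if_pos (by rw [he])]
    · rw [if_neg he]
      have harr : P ++ c :: cs = (P ++ [c]) ++ cs := by simp
      have hlen : P.length + 1 = (P ++ [c]).length := by simp
      rw [harr, hlen, ih (P ++ [c]) (by simp), show (P ++ [c]).getLast (by simp) = c from
        List.getLast_concat .., ded_cons, if_neg (by simp [he])]
      simp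

theorem remDup_eq (l : List Char) : remDup l = ded none l := by
  cases l with
  | nil => rw [remDup, remDupLoop, dif_neg (by simp)]; rfl
  | cons c cs =>
    rw [remDup]
    have hspec := remDupLoop_spec cs [c] (by simp)
    rw [show remDupLoop (c :: cs) 1 = remDupLoop ([c] ++ cs) ([c] : List Char).length from rfl,
      hspec, ded_cons, if_neg (by simp)]
    rfl

theorem convert_aux (a : List Char) (x y : List Char) :
    a.foldl (fun (st : List Char × List Char) i =>
      if PySem.Chars.isIn (PySem.Chars.lower [i]) ['a', 'e', 'i', 'o', 'u']
      then (st.1 ++ [i], st.2) else (st.1, st.2 ++ [i])) (x, y)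
    = (x ++ a.filter pvV, y ++ a.filter (fun c => !pvV c)) := by
  induction a generalizing x y with
  | nil => simp
  | cons c cs ih =>
    simp only [List.foldl_cons]
    by_cases hc : pvV c = true
    · rw [if_pos (by rw [← pvV]; exact hc), ih, List.filter_cons_of_pos hc,
        List.filter_cons_of_neg (by simp [hc])]
      simp
    · rw [if_neg (by rw [← pvV]; simp [hc]), ih, List.filter_cons_of_neg (by simp [hc]),
        List.filter_cons_of_pos (by simp [hc])]
      simp

theorem convert_eq (a : List Char) :
    convert a = a.filter pvV ++ a.filter (fun c => !pvV c) := by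
  rw [convert]
  simp only [convert_aux a [] []]
  rfl

-- ---- split characterisations ----

theorem splitSp_ne_nil (l : List Char) : splitSp l ≠ [] := by
  cases l with
  | nil => simp [splitSp]
  | cons c rest =>
    rw [splitSp]
    split
    · simp
    · split <;> simp

theorem splitSp_no_space (l : List Char) (h : ' ' ∉ l) : splitSp l = [l] := by
  induction l with
  | nil => rfl
  | cons c rest ih =>
    have hc : c ≠ ' ' := fun hc => h (hc ▸ List.mem_cons_self)
    rw [splitSp, if_neg hc, ih (fun hm => h (List.mem_cons_of_mem _ hm))]

theorem splitSp_word (w r : List Char) (h : ' ' ∉ w) :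
    splitSp (w ++ ' ' :: r) = w :: splitSp r := by
  induction w with
  | nil => simp [splitSp]
  | cons a w ih =>
    have ha : a ≠ ' ' := fun hc => h (hc ▸ List.mem_cons_self)
    rw [List.cons_append, splitSp, if_neg ha, ih (fun hm => h (List.mem_cons_of_mem _ hm))]

def consHead (pre : List Char) : List (List Char) → List (List Char)
  | [] => [pre]
  | w :: ws => (pre ++ w) :: ws

theorem splitOn_go_spec (l : List Char) : ∀ (fuel : Nat) (cur : List Char)
    (acc : List (List Char)), l.length < fuel →
    PySem.Chars.splitOn.go [' '] fuel l cur acc = acc.reverse ++ consHead cur.reverse (splitSp l) := by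
  induction l with
  | nil =>
    intro fuel cur acc hf
    cases fuel with
    | zero => omega
    | succ f => simp [PySem.Chars.splitOn.go, splitSp, consHead]
  | cons c rest ih =>
    intro fuel cur acc hf
    cases fuel with
    | zero => simp at hf
    | succ f =>
      by_cases hc : c = ' '
      · subst hc
        rw [show PySem.Chars.splitOn.go [' '] (f + 1) (' ' :: rest) cur acc
              = PySem.Chars.splitOn.go [' '] f rest [] (cur.reverse :: acc) from rfl]
        rw [ih f [] (cur.reverse :: acc) (by simpa using hf)]
        obtain ⟨w, ws, hws⟩ : ∃ w ws, splitSp rest = w :: ws := by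
          cases h : splitSp rest with
          | nil => exact absurd h (splitSp_ne_nil rest)
          | cons w ws => exact ⟨w, ws, rfl⟩
        rw [splitSp, if_pos rfl, hws]
        simp [consHead]
      · rw [show PySem.Chars.splitOn.go [' '] (f + 1) (c :: rest) cur acc
              = PySem.Chars.splitOn.go [' '] f rest (c :: cur) acc by
            simp [PySem.Chars.splitOn.go, List.isPrefixOf, Ne.symm hc]]
        rw [ih f (c :: cur) acc (by simpa using hf)]
        obtain ⟨w, ws, hws⟩ : ∃ w ws, splitSp rest = w :: ws := by
          cases h : splitSp rest with
          | nil => exact absurd h (splitSp_ne_nil rest)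
          | cons w ws => exact ⟨w, ws, rfl⟩
        rw [splitSp, if_neg hc, hws]
        simp [consHead]

theorem splitOn_eq (cs : List Char) : PySem.Chars.splitOn cs [' '] = splitSp cs := by
  rw [PySem.Chars.splitOn, splitOn_go_spec cs (cs.length + 1) [] [] (by omega)]
  obtain ⟨w, ws, hws⟩ : ∃ w ws, splitSp cs = w :: ws := by
    cases h : splitSp cs with
    | nil => exact absurd h (splitSp_ne_nil cs)
    | cons w ws => exact ⟨w, ws, rfl⟩
  rw [hws]
  simp [consHead]

-- ---- A's word splitting, up to letter filtering ----

theorem fil_space_cons (t : List Char) : fil (' ' :: t) = fil t := by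
  rw [fil, fil, List.filter_cons_of_neg (by decide)]

theorem transformLoop_spec : ∀ (n : Nat) (cs : List Char) (si : Nat) (acc : List (List Char)),
    cs.length - si ≤ n → si < cs.length → cs[si]? = some ' ' →
    (transformLoop cs si acc).map fil = acc.map fil ++ (splitSp (cs.drop (si + 1))).map fil := by
  intro n
  induction n with
  | zero => intro cs si acc h1 h2 _; omega
  | succ m ih =>
    intro cs si acc h1 h2 hsp
    have hk : si + 1 ≤ cs.length := h2
    rw [transformLoop, dif_pos h2]
    by_cases hj : PySem.Chars.findFrom cs [' '] ((si + 1 : Nat) : Int) = -1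
    · rw [dif_pos hj]
      have hno : ' ' ∉ cs.drop (si + 1) := by
        have := (PySem.Chars.findFrom_natCast_eq_neg_one_iff cs [' '] (si + 1) hk).mp hj
        exact fun hm => this ((List.singleton_infix_iff ' ' _).mpr hm)
      rw [splitSp_no_space _ hno]
      by_cases h0 : si = 0
      · subst h0
        obtain ⟨t, rfl⟩ : ∃ t, cs = ' ' :: t := by
          cases cs with
          | nil => simp at hsp
          | cons a t => simp at hsp; exact ⟨t, by rw [hsp]⟩
        rw [if_pos rfl]
        have hsl : PySem.List.slice (' ' :: t) (some 0)
            (some (((' ' :: t).length + 1 : Nat) : Int)) = ' ' :: t := by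
          rw [PySem.List.slice_zero_start, PySem.List.slice_to _ (by positivity)]
          simp
        rw [hsl]
        simp [fil_space_cons]
      · rw [if_neg h0]
        have hsl : PySem.List.slice cs (some ((si + 1 : Nat) : Int))
            (some ((cs.length + 1 : Nat) : Int)) = cs.drop (si + 1) := by
          rw [PySem.List.slice_natCast]
          apply List.take_of_length_le
          simp; omega
        rw [hsl]
        simp
    · rw [dif_neg hj]
      obtain ⟨hge, hpre, hmin⟩ := PySem.Chars.findFrom_natCast_spec cs [' '] (si + 1) hk hj
      set j := PySem.Chars.findFrom cs [' '] ((si + 1 : Nat) : Int) with hjdef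
      have hj1 : si + 1 ≤ j.toNat := by omega
      have hsp2 : cs[j.toNat]? = some ' ' := by
        rw [← List.head?_drop]; exact (singleton_prefix_iff _).mp hpre
      have hjlt : j.toNat < cs.length := by
        rcases List.getElem?_eq_some_iff.mp hsp2 with ⟨h, _⟩; exact h
      have hslice : PySem.List.slice cs (some ((si + 1 : Nat) : Int)) (some j)
          = (cs.drop (si + 1)).take (j.toNat - (si + 1)) := by
        rw [PySem.List.slice_toNat cs (by positivity) (by omega)]
        simp
      have hdec : cs.drop (si + 1)
          = (cs.drop (si + 1)).take (j.toNat - (si + 1)) ++ ' ' :: cs.drop (j.toNat + 1) := by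
        conv_lhs => rw [← List.take_append_drop (j.toNat - (si + 1)) (cs.drop (si + 1))]
        congr 1
        rw [List.drop_drop, show si + 1 + (j.toNat - (si + 1)) = j.toNat by omega,
          ← List.getElem_cons_drop hjlt]
        congr 1
        rcases List.getElem?_eq_some_iff.mp hsp2 with ⟨_, hval⟩
        exact hval
      have hnosp : ' ' ∉ (cs.drop (si + 1)).take (j.toNat - (si + 1)) := by
        intro hm
        obtain ⟨k, hklt, hkeq⟩ := List.getElem_of_mem hm
        have hk2 : k < j.toNat - (si + 1) := by
          have := hklt; simp [List.length_take] at this; omega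
        have hk3 : k < cs.length - (si + 1) := by
          have := hklt; simp [List.length_take] at this; omega
        apply hmin (si + 1 + k) (by omega) (by omega)
        rw [singleton_prefix_iff, List.head?_drop]
        rw [List.getElem_take, List.getElem_drop] at hkeq
        rw [List.getElem?_eq_some_iff]
        exact ⟨by omega, hkeq⟩
      rw [hslice, ih cs j.toNat _ (by omega) hjlt hsp2]
      conv_rhs => rw [hdec]
      rw [splitSp_word _ _ hnosp]
      simp

theorem wordsA_filter (cs : List Char) :
    ((if PySem.Chars.find cs [' '] = -1 then
        [PySem.List.slice cs (some 0) (some ((cs.length + 1 : Nat) : Int))]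
      else
        transformLoop cs (PySem.Chars.find cs [' ']).toNat
          [PySem.List.slice cs (some 0) (some (PySem.Chars.find cs [' ']))]) : List (List Char)).map fil
    = (splitSp cs).map fil := by
  have hconv : PySem.Chars.find cs [' '] = PySem.Chars.findFrom cs [' '] ((0 : Nat) : Int) := by
    rw [Nat.cast_zero, PySem.Chars.findFrom_zero]
  by_cases hf : PySem.Chars.find cs [' '] = -1
  · rw [if_pos hf]
    have hno : ' ' ∉ cs := by
      have := (PySem.Chars.findFrom_natCast_eq_neg_one_iff cs [' '] 0 (by omega)).mp
        (hconv ▸ hf)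
      simpa using fun hm => this ((List.singleton_infix_iff ' ' _).mpr hm)
    rw [splitSp_no_space _ hno]
    have hsl : PySem.List.slice cs (some 0) (some ((cs.length + 1 : Nat) : Int)) = cs := by
      rw [PySem.List.slice_zero_start, PySem.List.slice_to cs (by positivity)]
      simp
    rw [hsl]
  · rw [if_neg hf]
    obtain ⟨hge, hpre, hmin⟩ := PySem.Chars.findFrom_natCast_spec cs [' '] 0 (by omega)
      (hconv ▸ hf)
    rw [← hconv] at hge hpre hmin
    set f0 := PySem.Chars.find cs [' '] with hf0
    have hsp2 : cs[f0.toNat]? = some ' ' := by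
      rw [← List.head?_drop]; exact (singleton_prefix_iff _).mp hpre
    have hlt : f0.toNat < cs.length := by
      rcases List.getElem?_eq_some_iff.mp hsp2 with ⟨h, _⟩; exact h
    have hsl : PySem.List.slice cs (some 0) (some f0) = cs.take f0.toNat := by
      rw [PySem.List.slice_zero_start, PySem.List.slice_to cs (by omega)]
    have hnosp : ' ' ∉ cs.take f0.toNat := by
      intro hm
      obtain ⟨k, hklt, hkeq⟩ := List.getElem_of_mem hm
      have hk2 : k < f0.toNat := by
        have := hklt; simp [List.length_take] at this; omega
      have hk3 : k < cs.length := by omega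
      apply hmin k (by omega) (by omega)
      rw [singleton_prefix_iff, List.head?_drop]
      rw [List.getElem_take] at hkeq
      rw [List.getElem?_eq_some_iff]
      exact ⟨hk3, hkeq⟩
    have hdec : cs = cs.take f0.toNat ++ ' ' :: cs.drop (f0.toNat + 1) := by
      conv_lhs => rw [← List.take_append_drop f0.toNat cs]
      congr 1
      rw [← List.getElem_cons_drop hlt]
      congr 1
      rcases List.getElem?_eq_some_iff.mp hsp2 with ⟨_, hval⟩
      exact hval
    rw [transformLoop_spec cs.length cs f0.toNat _ (by omega) hlt hsp2, hsl]
    conv_rhs => rw [hdec, splitSp_word _ _ hnosp]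
    simp

-- ---- the per-word value and the collecting folds ----

theorem dedup_fold (l : List Char) : ∀ (out : List Char) (prev : Option Char),
    l.foldl (fun (st : List Char × Option Char) c =>
      let cl := PySem.Chars.lowerChar c
      if st.2 ≠ some cl then (st.1 ++ [c], some cl) else st) (out, prev)
    = (out ++ ded prev l, dedLastAux prev l) := by
  induction l with
  | nil => intro out prev; simp [ded, dedLastAux]
  | cons c cs ih =>
    intro out prev
    simp only [List.foldl_cons]
    by_cases hp : prev = some (PySem.Chars.lowerChar c)
    · rw [if_neg (by simp [hp]), ih, ded_cons, if_pos (by rw [hp]), dedLastAux_cons,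
        if_pos (by rw [hp])]
    · rw [if_pos hp, ih, ded_cons,
        if_neg (show ¬ some (PySem.Chars.lowerChar c) = prev from fun h => hp h.symm),
        dedLastAux_cons,
        if_neg (show ¬ some (PySem.Chars.lowerChar c) = prev from fun h => hp h.symm)]
      simp

theorem pvWordF_ne_nil (l : List Char) : (pvWordF l ≠ []) ↔ (ded none l ≠ []) := by
  rw [pvWordF]
  constructor
  · intro h hd; rw [hd] at h; simp at h
  · intro h hne
    apply h
    by_contra hd
    obtain ⟨a, ha⟩ := List.exists_mem_of_ne_nil (ded none l) hd
    rcases List.append_eq_nil_iff.mp hne with ⟨h1, h2⟩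
    have hv1 := List.filter_eq_nil_iff.mp h1 a ha
    have hv2 := List.filter_eq_nil_iff.mp h2 a ha
    simp at hv1 hv2
    simp [hv1] at hv2

theorem collectA (ws : List (List Char)) : ∀ (x : List (List Char)),
    ws.foldl (fun x i =>
      let z := convert (remDup (remDig i))
      if z ≠ [] then x ++ [z] else x) x
    = x ++ ((ws.map fil).map pvWordF).filter (· ≠ []) := by
  induction ws with
  | nil => intro x; simp
  | cons w ws ih =>
    intro x
    have hz : convert (remDup (remDig w)) = pvWordF (fil w) := by
      rw [remDig_eq, remDup_eq, convert_eq, pvWordF]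
    simp only [List.foldl_cons, hz]
    by_cases h : pvWordF (fil w) ≠ []
    · rw [if_pos h, ih]
      simp [h]
    · rw [if_neg h, ih]
      simp only [ne_eq, not_not] at h
      simp [h]

theorem collectB (ws : List (List Char)) : ∀ (x : List (List Char)),
    ws.foldl (fun out word =>
      let letters := word.filter PySem.Chars.isalpha
      let dedup := (letters.foldl (fun (st : List Char × Option Char) c =>
        let cl := PySem.Chars.lowerChar c
        if st.2 ≠ some cl then (st.1 ++ [c], some cl) else st) ([], none)).1
      if dedup ≠ [] then
        let vowels := dedup.filter (fun c =>
          PySem.Chars.isIn (PySem.Chars.lower [c]) ['a', 'e', 'i', 'o', 'u'])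
        let others := dedup.filter (fun c =>
          !(PySem.Chars.isIn (PySem.Chars.lower [c]) ['a', 'e', 'i', 'o', 'u']))
        out ++ [vowels ++ others]
      else out) x
    = x ++ ((ws.map fil).map pvWordF).filter (· ≠ []) := by
  induction ws with
  | nil => intro x; simp
  | cons w ws ih =>
    intro x
    simp only [List.foldl_cons]
    have hd : ((w.filter PySem.Chars.isalpha).foldl (fun (st : List Char × Option Char) c =>
        let cl := PySem.Chars.lowerChar c
        if st.2 ≠ some cl then (st.1 ++ [c], some cl) else st) ([], none)).1
        = ded none (fil w) := by
      rw [dedup_fold]; rfl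
    by_cases h : ded none (fil w) ≠ []
    · rw [hd, if_pos h, ih]
      have hw : pvWordF (fil w) ≠ [] := (pvWordF_ne_nil (fil w)).mpr h
      simp only [List.map_cons, List.filter_cons]
      rw [if_pos (by simpa using hw)]
      show x ++ [pvWordF (fil w)] ++ _ = x ++ (pvWordF (fil w) :: _)
      simp
    · rw [hd, if_neg h, ih]
      have hw : ¬ pvWordF (fil w) ≠ [] := fun hc => h ((pvWordF_ne_nil (fil w)).mp hc)
      simp only [ne_eq, not_not] at hw
      simp only [List.map_cons, List.filter_cons]
      rw [if_neg (by simp [hw])]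

-- ---- the joins ----

theorem joinA_aux (x : List (List Char)) : ∀ (y : List Char),
    x.foldl (fun y i => y ++ i ++ [' ']) y = y ++ (x.map (· ++ [' '])).flatten := by
  induction x with
  | nil => intro y; simp
  | cons w ws ih => intro y; rw [List.foldl_cons, ih]; simp

theorem flatten_space (w : List Char) (ws : List (List Char)) :
    ((w :: ws).map (· ++ [' '])).flatten = List.intercalate [' '] (w :: ws) ++ [' '] := by
  induction ws generalizing w with
  | nil => simp [List.intercalate]
  | cons v vs ih =>
    have h2 : List.intercalate [' '] (w :: v :: vs)
        = w ++ [' '] ++ List.intercalate [' '] (v :: vs) := by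
      simp [List.intercalate, List.intersperse]
    rw [List.map_cons, List.flatten_cons, ih v, h2]
    simp

theorem joinA (x : List (List Char)) :
    (x.foldl (fun y i => y ++ i ++ [' ']) []).dropLast = PySem.Chars.join [' '] x := by
  rw [joinA_aux, PySem.Chars.join]
  cases x with
  | nil => simp [List.intercalate]
  | cons w ws =>
    rw [List.nil_append, flatten_space, List.dropLast_concat]

-- ===== VERDICT (by name: the statement is the Claim_ definition above) =====
theorem transform_spec : Claim_equal_transform := by
  intro sentence _
  unfold Spec_transform transform transform_alt
  simp only []
  rw [collectA, collectB, splitOn_eq, wordsA_filter, PySem.List.slice_to_neg_one, joinA]
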